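-- pv_equiv track=rewrite | github.com/ishantkhurana900/medical-ai-diagnosis | ml_models/predictor.py | assess_overall_severity
-- ===== SOURCE A (Python) =====
-- def assess_overall_severity(symptoms, text_severity, conditions):
--     """Assess overall severity based on symptoms and conditions"""
--
--     # Check for high-severity symptoms
--     high_severity_symptoms = ['chest pain', 'shortness of breath', 'severe headache']
--     has_high_severity = any(symptom in high_severity_symptoms for symptom in symptoms)
--
--     # Check condition severities
--     condition_severities = [c.get('severity', 'Low') for c in conditions]
--     has_high_severity_condition = 'High' in condition_severities or 'Medium' in condition_severities
--
--     if has_high_severity or text_severity == 'High':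
--         return 'High'
--     elif has_high_severity_condition or text_severity == 'Medium':
--         return 'Medium'
--     else:
--         return 'Low'
-- ===== SOURCE B (Python) =====
-- def assess_overall_severity(symptoms, text_severity, conditions):
--     """Assess overall severity based on symptoms and conditions"""
--     rank = {'Low': 0, 'Medium': 1, 'High': 2}
--     high_severity_symptoms = ['chest pain', 'shortness of breath', 'severe headache']
--     # Reify each independent evidence source as a label "vote", then take the
--     # rank-maximum vote.  A high-severity symptom votes 'High'; the text severity
--     # votes itself (if recognised); a High/Medium condition votes 'Medium'.
--     votes = ['Low', {'High': 'High', 'Medium': 'Medium'}.get(text_severity, 'Low')]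
--     votes += ['High' if s in high_severity_symptoms else 'Low' for s in symptoms]
--     votes += ['Medium' if c.get('severity', 'Low') in ('High', 'Medium') else 'Low'
--               for c in conditions]
--     return max(votes, key=lambda v: rank[v])
-- ===== Notes on version B (the rewrite author's own statement) =====
-- stated objective: alternative
-- what changed: Instead of computing three boolean flags and cascading if/elif, B reifies every evidence source (each symptom, the text severity, each condition) into a list of label votes and returns the rank-maximum vote with a single max(key=rank) reduction.
import Mathlib
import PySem

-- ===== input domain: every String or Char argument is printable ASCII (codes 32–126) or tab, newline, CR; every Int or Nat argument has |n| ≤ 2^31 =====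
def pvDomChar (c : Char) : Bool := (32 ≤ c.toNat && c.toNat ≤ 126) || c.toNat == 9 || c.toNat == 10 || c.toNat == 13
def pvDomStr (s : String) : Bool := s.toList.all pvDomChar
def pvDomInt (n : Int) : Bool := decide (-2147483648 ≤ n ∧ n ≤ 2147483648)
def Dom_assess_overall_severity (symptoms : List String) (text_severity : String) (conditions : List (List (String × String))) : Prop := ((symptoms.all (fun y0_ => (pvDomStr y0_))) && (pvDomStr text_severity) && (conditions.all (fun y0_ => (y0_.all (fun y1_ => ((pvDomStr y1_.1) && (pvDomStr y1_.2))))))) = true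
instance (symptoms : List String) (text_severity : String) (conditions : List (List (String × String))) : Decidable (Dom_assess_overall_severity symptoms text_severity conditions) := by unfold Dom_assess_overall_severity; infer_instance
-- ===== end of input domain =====

-- B reifies every evidence source (each symptom, the text severity, each condition)
-- into a list of label "votes" and returns the rank-maximum vote with one
-- max(key=rank) reduction, instead of A's boolean flags + if/elif cascade
-- (objective: alternative decomposition, same cost).


-- ===== PORT A =====
def assess_overall_severity (symptoms : List String) (text_severity : String) (conditions : List (List (String × String))) : String :=
  let high_severity_symptoms := ["chest pain", "shortness of breath", "severe headache"]
  let has_high_severity := symptoms.any (fun symptom => high_severity_symptoms.contains symptom)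
  let condition_severities := conditions.map (fun c => PySem.Dict.getD (PySem.Dict.mk c) "severity" "Low")
  let has_high_severity_condition := condition_severities.contains "High" || condition_severities.contains "Medium"
  if has_high_severity || text_severity == "High" then "High"
  else if has_high_severity_condition || text_severity == "Medium" then "Medium"
  else "Low"

-- ===== PORT B =====
-- rank[v]: KeyError is unreachable (votes only holds the three labels), so the
-- lookup is ported as get? with a default for totality
def sevRank (v : String) : Int :=
  (PySem.Dict.get? (PySem.Dict.mk [("Low", (0 : Int)), ("Medium", 1), ("High", 2)]) v).getD 0

def assess_overall_severity_alt (symptoms : List String) (text_severity : String) (conditions : List (List (String × String))) : String :=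
  let high_severity_symptoms := ["chest pain", "shortness of breath", "severe headache"]
  let votes := ["Low", PySem.Dict.getD (PySem.Dict.mk [("High", "High"), ("Medium", "Medium")]) text_severity "Low"]
    ++ symptoms.map (fun s => if high_severity_symptoms.contains s then "High" else "Low")
    ++ conditions.map (fun c =>
        let sv := PySem.Dict.getD (PySem.Dict.mk c) "severity" "Low"
        if sv == "High" || sv == "Medium" then "Medium" else "Low")
  -- votes is nonempty, so Python's max never raises; getD's default is unreachable
  (PySem.List.max? votes sevRank).getD "Low"

-- ===== PRECONDITION & SPEC =====
def Spec_assess_overall_severity (symptoms : List String) (text_severity : String) (conditions : List (List (String × String))) (out : String) : Prop := out = assess_overall_severity_alt symptoms text_severity conditions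
instance (symptoms : List String) (text_severity : String) (conditions : List (List (String × String))) (out : String) : Decidable (Spec_assess_overall_severity symptoms text_severity conditions out) := by unfold Spec_assess_overall_severity; infer_instance

-- ===== CLAIM (what is proved, stated in full; the proofs are below) =====
def Claim_equal_assess_overall_severity : Prop := ∀ (symptoms : List String) (text_severity : String) (conditions : List (List (String × String))), Dom_assess_overall_severity symptoms text_severity conditions → Spec_assess_overall_severity symptoms text_severity conditions (assess_overall_severity symptoms text_severity conditions)

-- ===== LEMMAS AND PROOFS =====

-- the foldl step underlying PySem.List.max? at key sevRank
def maxStep (acc : Option String) (x : String) : Option String :=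
  match acc with
  | none => some x
  | some m => if sevRank m < sevRank x then some x else some m

lemma max?_eq_foldl (xs : List String) :
    PySem.List.max? xs sevRank = xs.foldl maxStep none := by
  unfold PySem.List.max?
  congr 1
  funext acc x
  cases acc <;> rfl

-- the text-severity vote as a closed if-chain
lemma tvote_eq (t : String) :
    PySem.Dict.getD (PySem.Dict.mk [("High", "High"), ("Medium", "Medium")]) t "Low"
      = if t = "High" then "High" else if t = "Medium" then "Medium" else "Low" := by
  by_cases h1 : t = "High" <;> by_cases h2 : t = "Medium" <;>
    simp only [PySem.Dict.getD, PySem.Dict.get?, List.find?, h1, h2, if_pos] <;>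
    first
      | rfl
      | (rw [show ("High" == t) = false from beq_eq_false_iff_ne.mpr (Ne.symm h1),
             show ("Medium" == t) = false from beq_eq_false_iff_ne.mpr (Ne.symm h2)]
         decide)

-- reducing the vote fold over symptom votes (all 'Low' or 'High')
lemma foldl_LH (l : List String) (h : ∀ v ∈ l, v = "Low" ∨ v = "High")
    (acc : String) (hacc : acc = "Low" ∨ acc = "Medium" ∨ acc = "High") :
    l.foldl maxStep (some acc) = some (if l.contains "High" then "High" else acc) := by
  induction l generalizing acc with
  | nil => simp
  | cons v t ih =>
    have ht : ∀ x ∈ t, x = "Low" ∨ x = "High" := fun x hx => h x (List.mem_cons_of_mem _ hx)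
    rcases h v (List.mem_cons_self ..) with rfl | rfl
    · have hstep : maxStep (some acc) "Low" = some acc := by
        rcases hacc with rfl | rfl | rfl <;> rfl
      rw [List.foldl_cons, hstep, ih ht acc hacc, List.contains_cons]
      have : ("High" == "Low") = false := by decide
      simp [this]
    · have hstep : maxStep (some acc) "High" = some "High" := by
        rcases hacc with rfl | rfl | rfl <;> rfl
      rw [List.foldl_cons, hstep, ih ht "High" (Or.inr (Or.inr rfl)), List.contains_cons]
      simp

-- reducing the vote fold over condition votes (all 'Low' or 'Medium')
lemma foldl_LM (l : List String) (h : ∀ v ∈ l, v = "Low" ∨ v = "Medium")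
    (acc : String) (hacc : acc = "Low" ∨ acc = "Medium" ∨ acc = "High") :
    l.foldl maxStep (some acc)
      = some (if l.contains "Medium" then (if acc = "Low" then "Medium" else acc) else acc) := by
  induction l generalizing acc with
  | nil => simp
  | cons v t ih =>
    have ht : ∀ x ∈ t, x = "Low" ∨ x = "Medium" := fun x hx => h x (List.mem_cons_of_mem _ hx)
    rcases h v (List.mem_cons_self ..) with rfl | rfl
    · have hstep : maxStep (some acc) "Low" = some acc := by
        rcases hacc with rfl | rfl | rfl <;> rfl
      rw [List.foldl_cons, hstep, ih ht acc hacc, List.contains_cons]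
      have : ("Medium" == "Low") = false := by decide
      simp [this]
    · have hstep : maxStep (some acc) "Medium" = some (if acc = "Low" then "Medium" else acc) := by
        rcases hacc with rfl | rfl | rfl <;> rfl
      rw [List.foldl_cons, hstep, List.contains_cons]
      have hacc' : (if acc = "Low" then "Medium" else acc) = "Low" ∨
          (if acc = "Low" then "Medium" else acc) = "Medium" ∨
          (if acc = "Low" then "Medium" else acc) = "High" := by
        rcases hacc with rfl | rfl | rfl <;> simp
      rw [ih ht _ hacc']
      rcases hacc with rfl | rfl | rfl <;> simp

-- 'x ∈ map f l' membership equals a single any over l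
lemma contains_map_eq_any {α : Type} (l : List α) (f : α → String) (x : String) :
    (l.map f).contains x = l.any (fun c => f c == x) := by
  induction l with
  | nil => rfl
  | cons h t ih =>
    simp only [List.map_cons, List.contains_cons, ih, List.any_cons, BEq.comm]

lemma any_or_eq {α : Type} (l : List α) (p q : α → Bool) :
    (l.any p || l.any q) = l.any (fun c => p c || q c) := by
  induction l with
  | nil => rfl
  | cons h t ih =>
    simp only [List.any_cons, ← ih]
    cases p h <;> cases q h <;> cases t.any p <;> cases t.any q <;> rfl

-- ===== VERDICT (by name: the statement is the Claim_ definition above) =====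
theorem assess_overall_severity_spec : Claim_equal_assess_overall_severity := by
  intro symptoms text_severity conditions _
  unfold Spec_assess_overall_severity assess_overall_severity assess_overall_severity_alt
  simp only [max?_eq_foldl, tvote_eq, List.cons_append, List.nil_append, List.foldl_cons,
    List.foldl_append]
  set f : String → String :=
    fun s => if (["chest pain", "shortness of breath", "severe headache"] : List String).contains s then "High" else "Low" with hf
  set g : List (String × String) → String :=
    fun c => if (PySem.Dict.getD (PySem.Dict.mk c) "severity" "Low" == "High"
                 || PySem.Dict.getD (PySem.Dict.mk c) "severity" "Low" == "Medium")
             then "Medium" else "Low" with hg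
  have hS : ∀ v ∈ symptoms.map f, v = "Low" ∨ v = "High" := by
    intro v hv
    rcases List.mem_map.mp hv with ⟨s, _, rfl⟩
    simp only [hf]
    split
    · exact Or.inr rfl
    · exact Or.inl rfl
  have hC : ∀ v ∈ conditions.map g, v = "Low" ∨ v = "Medium" := by
    intro v hv
    rcases List.mem_map.mp hv with ⟨c, _, rfl⟩
    simp only [hg]
    split
    · exact Or.inr rfl
    · exact Or.inl rfl
  have hSc : (symptoms.map f).contains "High"
      = symptoms.any (fun s => (["chest pain", "shortness of breath", "severe headache"] : List String).contains s) := by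
    rw [contains_map_eq_any]
    congr 1; funext s
    simp only [hf]
    cases h : (["chest pain", "shortness of breath", "severe headache"] : List String).contains s <;>
      simp only [h, Bool.false_eq_true, reduceIte] <;> rfl
  have hCc : (conditions.map g).contains "Medium"
      = ((conditions.map (fun c => PySem.Dict.getD (PySem.Dict.mk c) "severity" "Low")).contains "High"
         || (conditions.map (fun c => PySem.Dict.getD (PySem.Dict.mk c) "severity" "Low")).contains "Medium") := by
    rw [contains_map_eq_any, contains_map_eq_any, contains_map_eq_any, any_or_eq]
    congr 1; funext c
    simp only [hg]
    cases h : (PySem.Dict.getD (PySem.Dict.mk c) "severity" "Low" == "High"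
        || PySem.Dict.getD (PySem.Dict.mk c) "severity" "Low" == "Medium") <;>
      simp only [h, Bool.false_eq_true, reduceIte] <;> rfl
  by_cases hH : text_severity = "High"
  · simp only [hH, String.reduceEq, reduceIte]
    rw [show maxStep (maxStep none "Low") "High" = some "High" from rfl,
        foldl_LH _ hS "High" (by simp), hSc]
    cases hs : symptoms.any (fun s => (["chest pain", "shortness of breath", "severe headache"] : List String).contains s) <;>
      simp only [Bool.false_eq_true, reduceIte] <;>
      rw [foldl_LM _ hC "High" (by simp), hCc] <;>
      cases hc : ((List.map (fun c => PySem.Dict.getD (PySem.Dict.mk c) "severity" "Low") conditions).contains "High"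
          || (List.map (fun c => PySem.Dict.getD (PySem.Dict.mk c) "severity" "Low") conditions).contains "Medium") <;>
      simp
  · by_cases hM : text_severity = "Medium"
    · simp only [hM, String.reduceEq, reduceIte]
      rw [show maxStep (maxStep none "Low") "Medium" = some "Medium" from rfl,
          foldl_LH _ hS "Medium" (by simp), hSc]
      cases hs : symptoms.any (fun s => (["chest pain", "shortness of breath", "severe headache"] : List String).contains s) <;>
        simp only [Bool.false_eq_true, reduceIte] <;>
        first
        | (rw [foldl_LM _ hC "High" (by simp), hCc])
        | (rw [foldl_LM _ hC "Medium" (by simp), hCc])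
      all_goals
        cases hc : ((List.map (fun c => PySem.Dict.getD (PySem.Dict.mk c) "severity" "Low") conditions).contains "High"
            || (List.map (fun c => PySem.Dict.getD (PySem.Dict.mk c) "severity" "Low") conditions).contains "Medium") <;>
          simp
    · simp only [if_neg hH, if_neg hM]
      rw [show maxStep (maxStep none "Low") "Low" = some "Low" from rfl,
          foldl_LH _ hS "Low" (by simp), hSc]
      have htH : (text_severity == "High") = false := beq_eq_false_iff_ne.mpr hH
      have htM : (text_severity == "Medium") = false := beq_eq_false_iff_ne.mpr hM
      cases hs : symptoms.any (fun s => (["chest pain", "shortness of breath", "severe headache"] : List String).contains s) <;>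
        simp only [Bool.false_eq_true, reduceIte] <;>
        first
        | (rw [foldl_LM _ hC "High" (by simp), hCc])
        | (rw [foldl_LM _ hC "Low" (by simp), hCc])
      all_goals
        cases hc : ((List.map (fun c => PySem.Dict.getD (PySem.Dict.mk c) "severity" "Low") conditions).contains "High"
            || (List.map (fun c => PySem.Dict.getD (PySem.Dict.mk c) "severity" "Low") conditions).contains "Medium") <;>
          simp [htH, htM]
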